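-- pv_equiv track=rewrite | github.com/shahcompbio/wgs | wgs/utils/helpers.py | add_extensions
-- ===== SOURCE A (Python) =====
-- def add_extensions(filepaths):
--     paths_extensions = []
--     for filepath in filepaths:
--         paths_extensions.append(filepath)
--
--         if filepath.endswith('.csv.gz') or filepath.endswith('csv'):
--             paths_extensions.append(filepath + '.yaml')
--         elif filepath.endswith('.vcf.gz'):
--             paths_extensions.append(filepath + '.csi')
--             paths_extensions.append(filepath + '.tbi')
--         elif filepath.endswith('.bam'):
--             paths_extensions.append(filepath + '.bai')
--
--     return paths_extensions
-- ===== SOURCE B (Python) =====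
-- def _build():
--     # Trie/DFA over REVERSED suffix patterns, encoded as flat transition and
--     # accept tables (states are ints, 0 is the root).
--     trans = {}
--     accept = {}
--     next_state = 1
--     for pat, exts in (('.csv.gz', ['.yaml']), ('csv', ['.yaml']),
--                       ('.vcf.gz', ['.csi', '.tbi']), ('.bam', ['.bai'])):
--         state = 0
--         for ch in reversed(pat):
--             key = (state, ch)
--             if key not in trans:
--                 trans[key] = next_state
--                 next_state += 1
--             state = trans[key]
--         accept.setdefault(state, exts)
--     return trans, accept
--
--
-- _TRANS, _ACCEPT = _build()
--
--
-- def _extras(filepath):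
--     state = 0
--     for ch in reversed(filepath):
--         state = _TRANS.get((state, ch))
--         if state is None:
--             return []
--         if state in _ACCEPT:
--             return [filepath + ext for ext in _ACCEPT[state]]
--     return []
--
--
-- def add_extensions(filepaths):
--     paths_extensions = []
--     for filepath in filepaths:
--         paths_extensions.append(filepath)
--         paths_extensions.extend(_extras(filepath))
--     return paths_extensions
-- ===== Notes on version B (the rewrite author's own statement) =====
-- stated objective: alternative
-- what changed: Suffix dispatch is done by walking the reversed filepath through a trie-shaped automaton (flat transition/accept tables built once from the patterns) instead of A's chain of four endswith tests; correct because the reversed patterns are prefix-disjoint, so the first accept state reached coincides with A's first matching elif branch.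
import Mathlib
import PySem

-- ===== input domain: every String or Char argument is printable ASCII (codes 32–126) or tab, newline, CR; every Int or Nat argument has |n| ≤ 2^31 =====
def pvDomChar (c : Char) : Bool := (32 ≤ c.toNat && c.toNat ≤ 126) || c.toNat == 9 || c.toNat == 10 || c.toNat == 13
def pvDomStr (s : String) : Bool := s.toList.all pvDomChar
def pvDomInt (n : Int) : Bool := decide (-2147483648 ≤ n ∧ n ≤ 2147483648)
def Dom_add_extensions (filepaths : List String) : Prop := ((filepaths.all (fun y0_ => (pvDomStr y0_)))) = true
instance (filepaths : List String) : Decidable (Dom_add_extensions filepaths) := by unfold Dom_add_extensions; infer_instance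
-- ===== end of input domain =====

-- B replaces A's endswith/elif chain by a trie-shaped automaton over the REVERSED
-- filepath (flat transition/accept tables built once from the suffix patterns);
-- alternative: different data structure and matching mechanism, same cost.

-- ===== PORT A =====
def add_extensions (filepaths : List String) : List String :=
  filepaths.foldl (fun paths_extensions filepath =>
    let paths_extensions := paths_extensions ++ [filepath]
    if PySem.Str.endswith filepath ".csv.gz" || PySem.Str.endswith filepath "csv" then
      paths_extensions ++ [filepath ++ ".yaml"]
    else if PySem.Str.endswith filepath ".vcf.gz" then
      paths_extensions ++ [filepath ++ ".csi"] ++ [filepath ++ ".tbi"]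
    else if PySem.Str.endswith filepath ".bam" then
      paths_extensions ++ [filepath ++ ".bai"]
    else paths_extensions) []

-- ===== PORT B =====
-- _build(): trie/DFA over the reversed suffix patterns; states are Ints, 0 is the root
def pvBuild : PySem.Dict (Int × Char) Int × PySem.Dict Int (List String) :=
  let init : PySem.Dict (Int × Char) Int × PySem.Dict Int (List String) × Int :=
    (PySem.Dict.empty, PySem.Dict.empty, 1)
  let res := ([(".csv.gz", [".yaml"]), ("csv", [".yaml"]),
               (".vcf.gz", [".csi", ".tbi"]), (".bam", [".bai"])] :
               List (String × List String)).foldl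
    (fun acc pe =>
      let inner := pe.1.toList.reverse.foldl
        (fun (st : PySem.Dict (Int × Char) Int × Int × Int) ch =>
          let trans := st.1; let next := st.2.1; let state := st.2.2
          -- "if key not in trans: trans[key] = next_state; next_state += 1; state = trans[key]"
          match trans.get? (state, ch) with
          | some s => (trans, next, s)
          | none => (trans.insert (state, ch) next, next + 1, next))
        (acc.1, acc.2.2, 0)
      let trans := inner.1; let next := inner.2.1; let state := inner.2.2
      let accept := if (acc.2.1.get? state).isSome then acc.2.1
                    else acc.2.1.insert state pe.2   -- accept.setdefault(state, exts)
      (trans, accept, next)) init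
  (res.1, res.2.1)

def pvTrans : PySem.Dict (Int × Char) Int := pvBuild.1
def pvAccept : PySem.Dict Int (List String) := pvBuild.2

-- _extras(): walk the reversed filepath through the automaton
def pvExtrasGo (fp : String) : List Char → Int → List String
  | [], _ => []
  | ch :: rest, state =>
    match pvTrans.get? (state, ch) with
    | none => []
    | some s =>
      match pvAccept.get? s with
      | some exts => exts.map (fun ext => fp ++ ext)
      | none => pvExtrasGo fp rest s

def pvExtras (filepath : String) : List String :=
  pvExtrasGo filepath filepath.toList.reverse 0

def add_extensions_alt (filepaths : List String) : List String :=
  filepaths.foldl (fun paths_extensions filepath =>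
    paths_extensions ++ [filepath] ++ pvExtras filepath) []

-- ===== PRECONDITION & SPEC =====
def Spec_add_extensions (filepaths : List String) (out : List String) : Prop := out = add_extensions_alt filepaths
instance (filepaths : List String) (out : List String) : Decidable (Spec_add_extensions filepaths out) := by unfold Spec_add_extensions; infer_instance

-- ===== CLAIM (what is proved, stated in full; the proofs are below) =====
def Claim_equal_add_extensions : Prop := ∀ (filepaths : List String), Dom_add_extensions filepaths → Spec_add_extensions filepaths (add_extensions filepaths)

-- ===== LEMMAS AND PROOFS =====

theorem pvTrans_lit : pvTrans = PySem.Dict.mk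
    [((0,'z'),1), ((1,'g'),2), ((2,'.'),3), ((3,'v'),4), ((4,'s'),5), ((5,'c'),6), ((6,'.'),7),
     ((0,'v'),8), ((8,'s'),9), ((9,'c'),10),
     ((3,'f'),11), ((11,'c'),12), ((12,'v'),13), ((13,'.'),14),
     ((0,'m'),15), ((15,'a'),16), ((16,'b'),17), ((17,'.'),18)] := by decide

theorem pvAccept_lit : pvAccept = PySem.Dict.mk
    [(7, [".yaml"]), (10, [".yaml"]), (14, [".csi", ".tbi"]), (18, [".bai"])] := by decide

theorem pvGet?_nil {kk vv : Type} [BEq kk] (x : kk) :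
    (PySem.Dict.mk ([] : List (kk × vv))).get? x = none := rfl

-- the automaton walk from the root equals first-matching reversed-prefix dispatch
theorem pvGo_spec (fp : String) (rcs : List Char) :
    pvExtrasGo fp rcs 0 =
      if ['z','g','.','v','s','c','.'] <+: rcs ∨ ['v','s','c'] <+: rcs then [fp ++ ".yaml"]
      else if ['z','g','.','f','c','v','.'] <+: rcs then [fp ++ ".csi", fp ++ ".tbi"]
      else if ['m','a','b','.'] <+: rcs then [fp ++ ".bai"]
      else [] := by
  cases rcs with
  | nil => simp [pvExtrasGo, pvTrans_lit, pvAccept_lit, PySem.Dict.get?_mk_cons, pvGet?_nil, beq_iff_eq, Prod.mk.injEq, List.cons_prefix_cons, List.prefix_nil]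
  | cons c0 r1 =>
    by_cases h0_1 : 'z' = c0
    case pos =>
      subst h0_1
      cases r1 with
      | nil => simp [pvExtrasGo, pvTrans_lit, pvAccept_lit, PySem.Dict.get?_mk_cons, pvGet?_nil, beq_iff_eq, Prod.mk.injEq, List.cons_prefix_cons, List.prefix_nil]
      | cons c1 r2 =>
        by_cases h1_2 : 'g' = c1
        case pos =>
          subst h1_2
          cases r2 with
          | nil => simp [pvExtrasGo, pvTrans_lit, pvAccept_lit, PySem.Dict.get?_mk_cons, pvGet?_nil, beq_iff_eq, Prod.mk.injEq, List.cons_prefix_cons, List.prefix_nil]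
          | cons c2 r3 =>
            by_cases h2_3 : '.' = c2
            case pos =>
              subst h2_3
              cases r3 with
              | nil => simp [pvExtrasGo, pvTrans_lit, pvAccept_lit, PySem.Dict.get?_mk_cons, pvGet?_nil, beq_iff_eq, Prod.mk.injEq, List.cons_prefix_cons, List.prefix_nil]
              | cons c3 r4 =>
                by_cases h3_4 : 'v' = c3
                case pos =>
                  subst h3_4
                  cases r4 with
                  | nil => simp [pvExtrasGo, pvTrans_lit, pvAccept_lit, PySem.Dict.get?_mk_cons, pvGet?_nil, beq_iff_eq, Prod.mk.injEq, List.cons_prefix_cons, List.prefix_nil]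
                  | cons c4 r5 =>
                    by_cases h4_5 : 's' = c4
                    case pos =>
                      subst h4_5
                      cases r5 with
                      | nil => simp [pvExtrasGo, pvTrans_lit, pvAccept_lit, PySem.Dict.get?_mk_cons, pvGet?_nil, beq_iff_eq, Prod.mk.injEq, List.cons_prefix_cons, List.prefix_nil]
                      | cons c5 r6 =>
                        by_cases h5_6 : 'c' = c5
                        case pos =>
                          subst h5_6
                          cases r6 with
                          | nil => simp [pvExtrasGo, pvTrans_lit, pvAccept_lit, PySem.Dict.get?_mk_cons, pvGet?_nil, beq_iff_eq, Prod.mk.injEq, List.cons_prefix_cons, List.prefix_nil]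
                          | cons c6 r7 =>
                            by_cases h6_7 : '.' = c6
                            case pos =>
                              subst h6_7
                              simp [pvExtrasGo, pvTrans_lit, pvAccept_lit, PySem.Dict.get?_mk_cons, pvGet?_nil, beq_iff_eq, Prod.mk.injEq, List.cons_prefix_cons, List.prefix_nil]
                            case neg =>
                              simp [pvExtrasGo, pvTrans_lit, pvAccept_lit, PySem.Dict.get?_mk_cons, pvGet?_nil, beq_iff_eq, Prod.mk.injEq, List.cons_prefix_cons, List.prefix_nil, h6_7]
                        case neg =>
                          simp [pvExtrasGo, pvTrans_lit, pvAccept_lit, PySem.Dict.get?_mk_cons, pvGet?_nil, beq_iff_eq, Prod.mk.injEq, List.cons_prefix_cons, List.prefix_nil, h5_6]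
                    case neg =>
                      simp [pvExtrasGo, pvTrans_lit, pvAccept_lit, PySem.Dict.get?_mk_cons, pvGet?_nil, beq_iff_eq, Prod.mk.injEq, List.cons_prefix_cons, List.prefix_nil, h4_5]
                case neg =>
                  by_cases h3_11 : 'f' = c3
                  case pos =>
                    subst h3_11
                    cases r4 with
                    | nil => simp [pvExtrasGo, pvTrans_lit, pvAccept_lit, PySem.Dict.get?_mk_cons, pvGet?_nil, beq_iff_eq, Prod.mk.injEq, List.cons_prefix_cons, List.prefix_nil]
                    | cons c4 r5 =>
                      by_cases h4_12 : 'c' = c4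
                      case pos =>
                        subst h4_12
                        cases r5 with
                        | nil => simp [pvExtrasGo, pvTrans_lit, pvAccept_lit, PySem.Dict.get?_mk_cons, pvGet?_nil, beq_iff_eq, Prod.mk.injEq, List.cons_prefix_cons, List.prefix_nil]
                        | cons c5 r6 =>
                          by_cases h5_13 : 'v' = c5
                          case pos =>
                            subst h5_13
                            cases r6 with
                            | nil => simp [pvExtrasGo, pvTrans_lit, pvAccept_lit, PySem.Dict.get?_mk_cons, pvGet?_nil, beq_iff_eq, Prod.mk.injEq, List.cons_prefix_cons, List.prefix_nil]
                            | cons c6 r7 =>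
                              by_cases h6_14 : '.' = c6
                              case pos =>
                                subst h6_14
                                simp [pvExtrasGo, pvTrans_lit, pvAccept_lit, PySem.Dict.get?_mk_cons, pvGet?_nil, beq_iff_eq, Prod.mk.injEq, List.cons_prefix_cons, List.prefix_nil]
                              case neg =>
                                simp [pvExtrasGo, pvTrans_lit, pvAccept_lit, PySem.Dict.get?_mk_cons, pvGet?_nil, beq_iff_eq, Prod.mk.injEq, List.cons_prefix_cons, List.prefix_nil, h6_14]
                          case neg =>
                            simp [pvExtrasGo, pvTrans_lit, pvAccept_lit, PySem.Dict.get?_mk_cons, pvGet?_nil, beq_iff_eq, Prod.mk.injEq, List.cons_prefix_cons, List.prefix_nil, h5_13]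
                      case neg =>
                        simp [pvExtrasGo, pvTrans_lit, pvAccept_lit, PySem.Dict.get?_mk_cons, pvGet?_nil, beq_iff_eq, Prod.mk.injEq, List.cons_prefix_cons, List.prefix_nil, h4_12]
                  case neg =>
                    simp [pvExtrasGo, pvTrans_lit, pvAccept_lit, PySem.Dict.get?_mk_cons, pvGet?_nil, beq_iff_eq, Prod.mk.injEq, List.cons_prefix_cons, List.prefix_nil, h3_4, h3_11]
            case neg =>
              simp [pvExtrasGo, pvTrans_lit, pvAccept_lit, PySem.Dict.get?_mk_cons, pvGet?_nil, beq_iff_eq, Prod.mk.injEq, List.cons_prefix_cons, List.prefix_nil, h2_3]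
        case neg =>
          simp [pvExtrasGo, pvTrans_lit, pvAccept_lit, PySem.Dict.get?_mk_cons, pvGet?_nil, beq_iff_eq, Prod.mk.injEq, List.cons_prefix_cons, List.prefix_nil, h1_2]
    case neg =>
      by_cases h0_8 : 'v' = c0
      case pos =>
        subst h0_8
        cases r1 with
        | nil => simp [pvExtrasGo, pvTrans_lit, pvAccept_lit, PySem.Dict.get?_mk_cons, pvGet?_nil, beq_iff_eq, Prod.mk.injEq, List.cons_prefix_cons, List.prefix_nil]
        | cons c1 r2 =>
          by_cases h1_9 : 's' = c1
          case pos =>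
            subst h1_9
            cases r2 with
            | nil => simp [pvExtrasGo, pvTrans_lit, pvAccept_lit, PySem.Dict.get?_mk_cons, pvGet?_nil, beq_iff_eq, Prod.mk.injEq, List.cons_prefix_cons, List.prefix_nil]
            | cons c2 r3 =>
              by_cases h2_10 : 'c' = c2
              case pos =>
                subst h2_10
                simp [pvExtrasGo, pvTrans_lit, pvAccept_lit, PySem.Dict.get?_mk_cons, pvGet?_nil, beq_iff_eq, Prod.mk.injEq, List.cons_prefix_cons, List.prefix_nil]
              case neg =>
                simp [pvExtrasGo, pvTrans_lit, pvAccept_lit, PySem.Dict.get?_mk_cons, pvGet?_nil, beq_iff_eq, Prod.mk.injEq, List.cons_prefix_cons, List.prefix_nil, h2_10]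
          case neg =>
            simp [pvExtrasGo, pvTrans_lit, pvAccept_lit, PySem.Dict.get?_mk_cons, pvGet?_nil, beq_iff_eq, Prod.mk.injEq, List.cons_prefix_cons, List.prefix_nil, h1_9]
      case neg =>
        by_cases h0_15 : 'm' = c0
        case pos =>
          subst h0_15
          cases r1 with
          | nil => simp [pvExtrasGo, pvTrans_lit, pvAccept_lit, PySem.Dict.get?_mk_cons, pvGet?_nil, beq_iff_eq, Prod.mk.injEq, List.cons_prefix_cons, List.prefix_nil]
          | cons c1 r2 =>
            by_cases h1_16 : 'a' = c1
            case pos =>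
              subst h1_16
              cases r2 with
              | nil => simp [pvExtrasGo, pvTrans_lit, pvAccept_lit, PySem.Dict.get?_mk_cons, pvGet?_nil, beq_iff_eq, Prod.mk.injEq, List.cons_prefix_cons, List.prefix_nil]
              | cons c2 r3 =>
                by_cases h2_17 : 'b' = c2
                case pos =>
                  subst h2_17
                  cases r3 with
                  | nil => simp [pvExtrasGo, pvTrans_lit, pvAccept_lit, PySem.Dict.get?_mk_cons, pvGet?_nil, beq_iff_eq, Prod.mk.injEq, List.cons_prefix_cons, List.prefix_nil]
                  | cons c3 r4 =>
                    by_cases h3_18 : '.' = c3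
                    case pos =>
                      subst h3_18
                      simp [pvExtrasGo, pvTrans_lit, pvAccept_lit, PySem.Dict.get?_mk_cons, pvGet?_nil, beq_iff_eq, Prod.mk.injEq, List.cons_prefix_cons, List.prefix_nil]
                    case neg =>
                      simp [pvExtrasGo, pvTrans_lit, pvAccept_lit, PySem.Dict.get?_mk_cons, pvGet?_nil, beq_iff_eq, Prod.mk.injEq, List.cons_prefix_cons, List.prefix_nil, h3_18]
                case neg =>
                  simp [pvExtrasGo, pvTrans_lit, pvAccept_lit, PySem.Dict.get?_mk_cons, pvGet?_nil, beq_iff_eq, Prod.mk.injEq, List.cons_prefix_cons, List.prefix_nil, h2_17]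
            case neg =>
              simp [pvExtrasGo, pvTrans_lit, pvAccept_lit, PySem.Dict.get?_mk_cons, pvGet?_nil, beq_iff_eq, Prod.mk.injEq, List.cons_prefix_cons, List.prefix_nil, h1_16]
        case neg =>
          simp [pvExtrasGo, pvTrans_lit, pvAccept_lit, PySem.Dict.get?_mk_cons, pvGet?_nil, beq_iff_eq, Prod.mk.injEq, List.cons_prefix_cons, List.prefix_nil, h0_1, h0_8, h0_15]


theorem pvExtras_eq (fp : String) :
    pvExtras fp =
      if PySem.Str.endswith fp ".csv.gz" || PySem.Str.endswith fp "csv" then [fp ++ ".yaml"]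
      else if PySem.Str.endswith fp ".vcf.gz" then [fp ++ ".csi", fp ++ ".tbi"]
      else if PySem.Str.endswith fp ".bam" then [fp ++ ".bai"]
      else [] := by
  have hp1 : PySem.Str.endswith fp ".csv.gz" = true ↔ (['z','g','.','v','s','c','.'] <+: fp.toList.reverse) := by
    have hl : (['z','g','.','v','s','c','.'] : List Char) = (".csv.gz".toList).reverse := by decide
    rw [hl, List.reverse_prefix]
    simp [PySem.Chars.endswith_iff]
  have hp2 : PySem.Str.endswith fp "csv" = true ↔ (['v','s','c'] <+: fp.toList.reverse) := by
    have hl : (['v','s','c'] : List Char) = ("csv".toList).reverse := by decide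
    rw [hl, List.reverse_prefix]
    simp [PySem.Chars.endswith_iff]
  have hp3 : PySem.Str.endswith fp ".vcf.gz" = true ↔ (['z','g','.','f','c','v','.'] <+: fp.toList.reverse) := by
    have hl : (['z','g','.','f','c','v','.'] : List Char) = (".vcf.gz".toList).reverse := by decide
    rw [hl, List.reverse_prefix]
    simp [PySem.Chars.endswith_iff]
  have hp4 : PySem.Str.endswith fp ".bam" = true ↔ (['m','a','b','.'] <+: fp.toList.reverse) := by
    have hl : (['m','a','b','.'] : List Char) = (".bam".toList).reverse := by decide
    rw [hl, List.reverse_prefix]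
    simp [PySem.Chars.endswith_iff]
  unfold pvExtras
  rw [pvGo_spec fp fp.toList.reverse]
  simp only [← hp1, ← hp2, ← hp3, ← hp4]
  simp [Bool.or_eq_true]

theorem pvFold_eq (filepaths : List String) (acc : List String) :
    filepaths.foldl (fun paths_extensions filepath =>
      let paths_extensions := paths_extensions ++ [filepath]
      if PySem.Str.endswith filepath ".csv.gz" || PySem.Str.endswith filepath "csv" then
        paths_extensions ++ [filepath ++ ".yaml"]
      else if PySem.Str.endswith filepath ".vcf.gz" then
        paths_extensions ++ [filepath ++ ".csi"] ++ [filepath ++ ".tbi"]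
      else if PySem.Str.endswith filepath ".bam" then
        paths_extensions ++ [filepath ++ ".bai"]
      else paths_extensions) acc
    = filepaths.foldl (fun paths_extensions filepath =>
        paths_extensions ++ [filepath] ++ pvExtras filepath) acc := by
  induction filepaths generalizing acc with
  | nil => rfl
  | cons fp rest ih =>
    simp only [List.foldl_cons]
    rw [← ih]
    congr 1
    rw [pvExtras_eq fp]
    split_ifs <;> simp

-- ===== VERDICT (by name: the statement is the Claim_ definition above) =====
theorem add_extensions_spec : Claim_equal_add_extensions := by
  intro filepaths _
  unfold Spec_add_extensions add_extensions add_extensions_alt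
  exact pvFold_eq filepaths []
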